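-- pv_equiv track=rewrite | github.com/PerryJones901/advent-of-code-2021 | day_10.py | get_part_1_answer
-- ===== SOURCE A (Python) =====
-- from typing import List
--
-- OPEN_BRACKETS = '([{<'
--
-- CLOSED_BRACKETS = ')]}>'
--
-- CLOSED_TO_OPEN_MAP = {
--     ')': '(',
--     ']': '[',
--     '}': '{',
--     '>': '<'
-- }
--
-- CLOSED_TO_SCORE_MAP_PART_1 = {
--     '': 0,
--     ')': 3,
--     ']': 57,
--     '}': 1197,
--     '>': 25137
-- }
--
-- def get_first_invalid_closing_bracket(input: str) -> str:
--     bracket_stack = []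
--     for char in input:
--         if char in OPEN_BRACKETS:
--             bracket_stack.append(char)
--         elif char in CLOSED_BRACKETS:
--             if len(bracket_stack) == 0:
--                 return char
--             elif bracket_stack[-1] == CLOSED_TO_OPEN_MAP[char]:
--                 bracket_stack.pop()
--             else:
--                 return char
--     return ''
--
-- def get_part_1_answer(input: List[str]) -> int:
--     invalid_closing_brackets = {
--         '': 0, # the case of no invalid closing bracket (ignored in points calculation)
--         ')': 0,
--         ']': 0,
--         '}': 0,
--         '>': 0
--     }
--     for input_line in input:
--         closed_bracket = get_first_invalid_closing_bracket(input_line)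
--         invalid_closing_brackets[closed_bracket] += 1
--     score = 0
--     for k, v in invalid_closing_brackets.items():
--         score += CLOSED_TO_SCORE_MAP_PART_1[k] * v
--
--     return score
-- ===== SOURCE B (Python) =====
-- from typing import List
--
-- SCORES = {')': 3, ']': 57, '}': 1197, '>': 25137}
-- PAIRS = {'(': ')', '[': ']', '{': '}', '<': '>'}
--
-- def _strip_pairs(s):
--     # one left-to-right pass deleting adjacent matching bracket pairs
--     res, i = [], 0
--     while i < len(s):
--         if i + 1 < len(s) and PAIRS.get(s[i]) == s[i + 1]:
--             i += 2
--         else: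
--             res.append(s[i])
--             i += 1
--     return res
--
-- def get_part_1_answer(input: List[str]) -> int:
--     total = 0
--     for line in input:
--         s = [c for c in line if c in SCORES or c in PAIRS]
--         while True:  # cancel adjacent matched pairs until the line is irreducible
--             t = _strip_pairs(s)
--             if t == s:
--                 break
--             s = t
--         # in a fully reduced line the first closing bracket (if any) is the illegal one
--         total += next((SCORES[c] for c in s if c in SCORES), 0)
--     return total
-- ===== Notes on version B (the rewrite author's own statement) =====
-- stated objective: alternative
-- what changed: B replaces A's online stack scan (push openers, pop on matching closer, stop at first mismatch) by a rewriting-system algorithm: it filters each line to its brackets, repeatedly deletes adjacent matching pairs until the line is irreducible, and then scores the first closing bracket of the reduced line (0 if none), summing directly instead of via A's frequency dictionary and second weighted loop.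
import Mathlib
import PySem

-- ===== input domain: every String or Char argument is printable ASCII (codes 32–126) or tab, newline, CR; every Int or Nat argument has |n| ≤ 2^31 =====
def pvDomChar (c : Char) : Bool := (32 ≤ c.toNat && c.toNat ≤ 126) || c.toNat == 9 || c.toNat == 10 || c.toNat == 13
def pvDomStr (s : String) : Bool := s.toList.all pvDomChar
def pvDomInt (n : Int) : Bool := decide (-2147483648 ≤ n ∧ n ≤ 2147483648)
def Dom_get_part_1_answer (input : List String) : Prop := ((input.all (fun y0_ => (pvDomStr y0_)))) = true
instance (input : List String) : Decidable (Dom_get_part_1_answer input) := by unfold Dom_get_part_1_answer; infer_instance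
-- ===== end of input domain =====

-- B replaces A's online stack scan by a rewriting algorithm: filter each line to its brackets,
-- delete adjacent matching pairs to a fixpoint, then score the first remaining closer (objective: alternative).

-- ===== PORT A =====
def pvOpenBrackets : List Char := ['(', '[', '{', '<']
def pvClosedBrackets : List Char := [')', ']', '}', '>']
def pvClosedToOpen : PySem.Dict Char Char :=
  PySem.Dict.ofList [(')', '('), (']', '['), ('}', '{'), ('>', '<')]
def pvScoreMap : PySem.Dict String Int :=
  PySem.Dict.ofList [("", 0), (")", 3), ("]", 57), ("}", 1197), (">", 25137)]

def pvGfiLoop : List Char → List Char → String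
  | [], _ => ""
  | c :: rest, bracket_stack =>
    if pvOpenBrackets.contains c then
      pvGfiLoop rest (bracket_stack ++ [c])
    else if pvClosedBrackets.contains c then
      if bracket_stack.length == 0 then String.ofList [c]
      else if PySem.List.pyGetD bracket_stack (-1) ' ' == pvClosedToOpen.getD c ' ' then
        pvGfiLoop rest bracket_stack.dropLast
      else String.ofList [c]
    else pvGfiLoop rest bracket_stack

def get_first_invalid_closing_bracket (input : String) : String :=
  pvGfiLoop input.toList []

def get_part_1_answer (input : List String) : Int :=
  let d0 : PySem.Dict String Int :=
    PySem.Dict.ofList [("", 0), (")", 0), ("]", 0), ("}", 0), (">", 0)]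
  let d := input.foldl
    (fun d line => d.modify (get_first_invalid_closing_bracket line) 0 (· + 1)) d0
  d.items.foldl (fun score kv => score + pvScoreMap.getD kv.1 0 * kv.2) 0

-- ===== PORT B =====
def pvScoresB : PySem.Dict Char Int :=
  PySem.Dict.ofList [(')', 3), (']', 57), ('}', 1197), ('>', 25137)]
def pvPairsB : PySem.Dict Char Char :=
  PySem.Dict.ofList [('(', ')'), ('[', ']'), ('{', '}'), ('<', '>')]

-- one left-to-right pass deleting adjacent matching bracket pairs (port of _strip_pairs;
-- 'PAIRS.get(s[i]) == s[i+1]' is pvPairsB.get? a == some b: None == char is False in Python)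
def pvStripPairs : List Char → List Char
  | [] => []
  | [c] => [c]
  | a :: b :: rest =>
    if pvPairsB.get? a == some b then pvStripPairs rest
    else a :: pvStripPairs (b :: rest)

-- termination bound for the fixpoint loop below (the port cites it in decreasing_by)
lemma pvStrip_len (s : List Char) : (pvStripPairs s).length ≤ s.length := by
  induction s using pvStripPairs.induct with
  | case1 => simp [pvStripPairs]
  | case2 c => simp [pvStripPairs]
  | case3 a b rest h ih => simp [pvStripPairs, h]; omega
  | case4 a b rest h ih => simp [pvStripPairs, h] at ih ⊢; omega

lemma pvStrip_eq_or_lt (s : List Char) :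
    pvStripPairs s = s ∨ (pvStripPairs s).length < s.length := by
  induction s using pvStripPairs.induct with
  | case1 => left; rfl
  | case2 c => left; rfl
  | case3 a b rest h ih =>
    right
    have := pvStrip_len rest
    simp [pvStripPairs, h]
    omega
  | case4 a b rest h ih =>
    rcases ih with heq | hlt
    · left; simp [pvStripPairs, h, heq]
    · right; simp [pvStripPairs, h] at hlt ⊢; omega

-- 'while True: t = _strip_pairs(s); if t == s: break; s = t'
def pvReduce (s : List Char) : List Char :=
  let t := pvStripPairs s
  if t = s then s else pvReduce t
termination_by s.length
decreasing_by
  rcases pvStrip_eq_or_lt s with heq | hlt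
  · exact absurd heq (by assumption)
  · exact hlt

-- 'next((SCORES[c] for c in s if c in SCORES), 0)'
def pvFirstCloserScore : List Char → Int
  | [] => 0
  | c :: rest =>
    match pvScoresB.get? c with
    | some v => v
    | none => pvFirstCloserScore rest

def get_part_1_answer_alt (input : List String) : Int :=
  input.foldl (fun total line =>
    total + pvFirstCloserScore (pvReduce
      (line.toList.filter (fun c => pvScoresB.contains c || pvPairsB.contains c)))) 0

-- ===== PRECONDITION & SPEC =====
def Spec_get_part_1_answer (input : List String) (out : Int) : Prop := out = get_part_1_answer_alt input
instance (input : List String) (out : Int) : Decidable (Spec_get_part_1_answer input out) := by unfold Spec_get_part_1_answer; infer_instance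

-- ===== CLAIM (what is proved, stated in full; the proofs are below) =====
def Claim_equal_get_part_1_answer : Prop := ∀ (input : List String), Dom_get_part_1_answer input → Spec_get_part_1_answer input (get_part_1_answer input)

-- ===== LEMMAS AND PROOFS =====

-- a matched pair in pvPairsB, seen from A's tables
lemma pv_pair_cases (a b : Char) (h : pvPairsB.get? a = some b) :
    pvClosedToOpen.getD b ' ' = a ∧ a ∈ pvOpenBrackets ∧ b ∈ pvClosedBrackets := by
  have ha : a ∈ pvPairsB.keys := by
    by_contra hmem
    rw [(PySem.Dict.get?_eq_none_iff_not_mem_keys pvPairsB a).2 hmem] at h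
    simp at h
  have hk : pvPairsB.keys = pvOpenBrackets := by decide
  rw [hk] at ha
  have ha' : a = '(' ∨ a = '[' ∨ a = '{' ∨ a = '<' := by
    simpa [pvOpenBrackets] using ha
  rcases ha' with rfl | rfl | rfl | rfl
  · obtain rfl := Option.some.inj (show some ')' = some b from h); decide
  · obtain rfl := Option.some.inj (show some ']' = some b from h); decide
  · obtain rfl := Option.some.inj (show some '}' = some b from h); decide
  · obtain rfl := Option.some.inj (show some '>' = some b from h); decide

-- the filter predicate of B keeps exactly the characters A reacts to
lemma pv_isBr_iff (c : Char) :
    (pvScoresB.contains c || pvPairsB.contains c) = true ↔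
      c ∈ pvOpenBrackets ∨ c ∈ pvClosedBrackets := by
  rw [PySem.Dict.contains_eq_decide_mem_keys, PySem.Dict.contains_eq_decide_mem_keys]
  have h1 : pvScoresB.keys = pvClosedBrackets := by decide
  have h2 : pvPairsB.keys = pvOpenBrackets := by decide
  rw [h1, h2]
  simp [or_comm]

-- if two tails give equal scans from every stack, so do their extensions by the same character
lemma pv_gfi_cons_congr (c : Char) (X Y : List Char)
    (hXY : ∀ st', pvGfiLoop X st' = pvGfiLoop Y st') (st : List Char) :
    pvGfiLoop (c :: X) st = pvGfiLoop (c :: Y) st := by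
  unfold pvGfiLoop
  split_ifs <;> first | rfl | exact hXY _

-- A's scan ignores characters that are not brackets
lemma pv_gfi_skip (c : Char) (h1 : c ∉ pvOpenBrackets)
    (h2 : c ∉ pvClosedBrackets) (rest st : List Char) :
    pvGfiLoop (c :: rest) st = pvGfiLoop rest st := by
  simp [pvGfiLoop, h1, h2]

lemma pv_gfi_filter (cs : List Char) : ∀ st,
    pvGfiLoop (cs.filter (fun c => pvScoresB.contains c || pvPairsB.contains c)) st
      = pvGfiLoop cs st := by
  induction cs with
  | nil => intro st; rfl
  | cons c rest ih =>
    intro st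
    by_cases hbr : (pvScoresB.contains c || pvPairsB.contains c) = true
    · simp only [List.filter_cons]
      rw [if_pos hbr]
      exact pv_gfi_cons_congr c _ rest ih st
    · have hn : ¬(c ∈ pvOpenBrackets ∨ c ∈ pvClosedBrackets) :=
        fun hcon => hbr ((pv_isBr_iff c).2 hcon)
      simp only [List.filter_cons]
      rw [if_neg hbr]
      rw [pv_gfi_skip c (fun hcon => hn (Or.inl hcon)) (fun hcon => hn (Or.inr hcon))]
      exact ih st

-- one cancellation pass does not change A's scan result
lemma pv_gfi_strip (s : List Char) : ∀ st, pvGfiLoop (pvStripPairs s) st = pvGfiLoop s st := by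
  induction s using pvStripPairs.induct with
  | case1 => intro st; rfl
  | case2 c => intro st; rfl
  | case3 a b rest h ih =>
    intro st
    obtain ⟨hmap, ha, hb⟩ := pv_pair_cases a b (by simpa using h)
    have hbo : b ∉ pvOpenBrackets := by fin_cases hb <;> decide
    have h1 : pvGfiLoop (a :: b :: rest) st = pvGfiLoop (b :: rest) (st ++ [a]) := by
      simp [pvGfiLoop, ha]
    have h2 : pvGfiLoop (b :: rest) (st ++ [a]) = pvGfiLoop rest st := by
      simp [pvGfiLoop, hbo, hb, PySem.List.pyGetD_neg_one_append_singleton, hmap]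
    rw [show pvStripPairs (a :: b :: rest) = pvStripPairs rest by simp [pvStripPairs, h]]
    rw [h1, h2]
    exact ih st
  | case4 a b rest h ih =>
    intro st
    rw [show pvStripPairs (a :: b :: rest) = a :: pvStripPairs (b :: rest) by
      simp [pvStripPairs, h]]
    exact pv_gfi_cons_congr a _ _ ih st

-- the fixpoint loop preserves A's scan result, reaches a fixpoint, and only deletes characters
lemma pvReduce_eq (s : List Char) :
    pvReduce s = if pvStripPairs s = s then s else pvReduce (pvStripPairs s) := by
  rw [pvReduce]

lemma pv_reduce_gfi (s : List Char) : ∀ st, pvGfiLoop (pvReduce s) st = pvGfiLoop s st := by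
  induction s using pvReduce.induct with
  | case1 s t heq =>
    intro st; rw [pvReduce_eq, if_pos heq]
  | case2 s t hne ih =>
    intro st
    rw [pvReduce_eq, if_neg hne]
    rw [ih st]
    exact pv_gfi_strip s st

lemma pv_reduce_fix (s : List Char) : pvStripPairs (pvReduce s) = pvReduce s := by
  induction s using pvReduce.induct with
  | case1 s t heq => rw [pvReduce_eq, if_pos heq]; exact heq
  | case2 s t hne ih => rw [pvReduce_eq, if_neg hne]; exact ih

lemma pv_strip_sublist (s : List Char) : List.Sublist (pvStripPairs s) s := by
  induction s using pvStripPairs.induct with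
  | case1 => simp [pvStripPairs]
  | case2 c => simp [pvStripPairs]
  | case3 a b rest h ih =>
    rw [show pvStripPairs (a :: b :: rest) = pvStripPairs rest by simp [pvStripPairs, h]]
    exact ih.trans ((List.sublist_cons_self b rest).trans (List.sublist_cons_self a _))
  | case4 a b rest h ih =>
    rw [show pvStripPairs (a :: b :: rest) = a :: pvStripPairs (b :: rest) by
      simp [pvStripPairs, h]]
    exact ih.cons₂ a

lemma pv_reduce_sublist (s : List Char) : List.Sublist (pvReduce s) s := by
  induction s using pvReduce.induct with
  | case1 s t heq => rw [pvReduce_eq, if_pos heq]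
  | case2 s t hne ih =>
    rw [pvReduce_eq, if_neg hne]
    exact ih.trans (pv_strip_sublist s)

-- an irreducible list has no matching pair at its front, and its tail is irreducible
lemma pv_fix_tail {a : Char} {rest : List Char} (h : pvStripPairs (a :: rest) = a :: rest) :
    pvStripPairs rest = rest ∧ (∀ b t, rest = b :: t → ¬ pvPairsB.get? a = some b) := by
  cases rest with
  | nil => exact ⟨rfl, by intro b t ht; cases ht⟩
  | cons b t =>
    by_cases hm : pvPairsB.get? a = some b
    · exfalso
      rw [show pvStripPairs (a :: b :: t) = pvStripPairs t by simp [pvStripPairs, hm]] at h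
      have h1 : (pvStripPairs t).length ≤ t.length := pvStrip_len t
      have h2 : (pvStripPairs t).length = t.length + 2 := by rw [h]; simp
      omega
    · rw [show pvStripPairs (a :: b :: t) = a :: pvStripPairs (b :: t) by
        simp [pvStripPairs, hm]] at h
      obtain ⟨-, h2⟩ := List.cons.inj h
      refine ⟨h2, ?_⟩
      intro b' t' ht
      obtain ⟨rfl, -⟩ := List.cons.inj ht
      exact hm

-- per-character scoring facts (closers score, openers do not)
lemma pv_closer_score : ∀ c ∈ pvClosedBrackets,
    pvScoresB.get? c = some (pvScoreMap.getD (String.ofList [c]) 0) := by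
  intro c hc; fin_cases hc <;> decide

lemma pv_opener_noscore : ∀ c ∈ pvOpenBrackets, pvScoresB.get? c = none := by
  intro c hc; fin_cases hc <;> decide

lemma pv_mismatch (o c : Char) (ho : o ∈ pvOpenBrackets) (hc : c ∈ pvClosedBrackets)
    (h : ¬ pvPairsB.get? o = some c) : ¬ pvClosedToOpen.getD c ' ' = o := by
  fin_cases ho <;> fin_cases hc <;> first | decide | exact absurd (by decide) h

-- on an irreducible all-bracket list, A's scan returns the first closer (or '')
lemma pv_irreducible_gfi : ∀ (r : List Char), (∀ x ∈ r, x ∈ pvOpenBrackets ∨ x ∈ pvClosedBrackets) →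
    pvStripPairs r = r →
    ∀ (st : List Char), (∀ x ∈ st, x ∈ pvOpenBrackets) →
    (∀ c t, r = c :: t → c ∈ pvClosedBrackets → ∀ o, st.getLast? = some o →
        ¬ pvPairsB.get? o = some c) →
    pvScoreMap.getD (pvGfiLoop r st) 0 = pvFirstCloserScore r := by
  intro r
  induction r with
  | nil =>
    intro _ _ st _ _
    exact (by decide : pvScoreMap.getD "" 0 = pvFirstCloserScore [])
  | cons a rest ih =>
    intro hbr hfix st hst hsafe
    rcases hbr a (List.mem_cons_self) with ho | hc
    · -- opener: push, recurse
      rw [show pvGfiLoop (a :: rest) st = pvGfiLoop rest (st ++ [a]) by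
        simp [pvGfiLoop, ho]]
      rw [show pvFirstCloserScore (a :: rest) = pvFirstCloserScore rest by
        simp [pvFirstCloserScore, pv_opener_noscore a ho]]
      obtain ⟨hfix', hfront⟩ := pv_fix_tail hfix
      refine ih (fun x hx => hbr x (List.mem_cons_of_mem a hx)) hfix' (st ++ [a]) ?_ ?_
      · intro x hx
        rcases List.mem_append.1 hx with h | h
        · exact hst x h
        · rw [List.mem_singleton.1 h]; exact ho
      · intro c t hrest _ o hlast
        rw [List.getLast?_concat] at hlast
        obtain rfl := Option.some.inj hlast
        exact hfront c t hrest
    · -- closer: the scan stops here in every admitted case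
      have ho' : a ∉ pvOpenBrackets := by fin_cases hc <;> decide
      have hscore : pvFirstCloserScore (a :: rest)
          = pvScoreMap.getD (String.ofList [a]) 0 := by
        simp [pvFirstCloserScore, pv_closer_score a hc]
      cases st with
      | nil =>
        rw [show pvGfiLoop (a :: rest) [] = String.ofList [a] by
          simp [pvGfiLoop, ho', hc]]
        exact hscore.symm
      | cons s0 st' =>
        have hne : s0 :: st' ≠ [] := by simp
        have hlast : (s0 :: st').getLast? = some ((s0 :: st').getLast hne) :=
          List.getLast?_eq_some_getLast hne
        have hmm := hsafe a rest rfl hc _ hlast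
        have hoo : (s0 :: st').getLast hne ∈ pvOpenBrackets := hst _ (List.getLast_mem hne)
        have hnot := pv_mismatch _ a hoo hc hmm
        have hlastD : PySem.List.pyGetD (s0 :: st') (-1) ' ' = (s0 :: st').getLast hne :=
          PySem.List.pyGetD_neg_one _ ' ' hne
        have hnot' : ¬ ((s0 :: st').getLast hne = pvClosedToOpen.getD a ' ') :=
          fun hcon => hnot hcon.symm
        rw [show pvGfiLoop (a :: rest) (s0 :: st') = String.ofList [a] by
          simp [pvGfiLoop, ho', hc, hlastD, hnot']]
        exact hscore.symm

-- per-line equivalence: A's score of the first invalid bracket = B's reduced-line score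
lemma pv_line_eq (line : String) :
    pvScoreMap.getD (get_first_invalid_closing_bracket line) 0
      = pvFirstCloserScore (pvReduce
          (line.toList.filter (fun c => pvScoresB.contains c || pvPairsB.contains c))) := by
  unfold get_first_invalid_closing_bracket
  rw [← pv_gfi_filter line.toList []]
  set f := line.toList.filter (fun c => pvScoresB.contains c || pvPairsB.contains c) with hf
  rw [← pv_reduce_gfi f []]
  refine pv_irreducible_gfi (pvReduce f) ?_ (pv_reduce_fix f) [] (by intro x hx; cases hx)
    (by intro c t _ _ o hlast; cases hlast)
  intro x hx
  have hmem : x ∈ f := (pv_reduce_sublist f).subset hx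
  rw [hf] at hmem
  exact (pv_isBr_iff x).1 (by simpa using (List.mem_filter.1 hmem).2)

-- the five keys of A's frequency dict, and the summation machinery over it
def pvK5 : List String := ["", ")", "]", "}", ">"]

lemma pv_closed_str_mem : ∀ c ∈ pvClosedBrackets, String.ofList [c] ∈ pvK5 := by
  intro c hc; fin_cases hc <;> decide

lemma pv_gfi_mem (cs : List Char) : ∀ stack, pvGfiLoop cs stack ∈ pvK5 := by
  induction cs with
  | nil => intro stack; simp [pvGfiLoop]; decide
  | cons c rest ih =>
    intro stack
    by_cases hcm : c ∈ pvOpenBrackets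
    · rw [show pvGfiLoop (c :: rest) stack = pvGfiLoop rest (stack ++ [c]) by
        simp [pvGfiLoop, hcm]]
      exact ih _
    · by_cases hccm : c ∈ pvClosedBrackets
      · rcases eq_or_ne stack [] with rfl | hs
        · rw [show pvGfiLoop (c :: rest) [] = String.ofList [c] by
            simp [pvGfiLoop, hcm, hccm]]
          exact pv_closed_str_mem c hccm
        · by_cases heq : PySem.List.pyGetD stack (-1) ' ' = pvClosedToOpen.getD c ' '
          · rw [show pvGfiLoop (c :: rest) stack = pvGfiLoop rest stack.dropLast by
              simp [pvGfiLoop, hcm, hccm, hs, heq]]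
            exact ih _
          · rw [show pvGfiLoop (c :: rest) stack = String.ofList [c] by
              simp [pvGfiLoop, hcm, hccm, hs, heq]]
            exact pv_closed_str_mem c hccm
      · rw [show pvGfiLoop (c :: rest) stack = pvGfiLoop rest stack by
          simp [pvGfiLoop, hcm, hccm]]
        exact ih stack

def pvScoreOf (d : PySem.Dict String Int) : Int :=
  d.items.foldl (fun score kv => score + pvScoreMap.getD kv.1 0 * kv.2) 0

lemma pv_keys_modify_K5 (d : PySem.Dict String Int) (hk : d.keys = pvK5) (k : String)
    (hkm : k ∈ pvK5) : (d.modify k 0 (· + 1)).keys = pvK5 := by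
  rw [PySem.Dict.keys_modify]
  have hc : d.contains k = true := (PySem.Dict.contains_iff_mem_keys d k).2 (hk ▸ hkm)
  rw [PySem.Dict.keys_insert_of_contains d _ hc, hk]

lemma pv_scoreOf_modify (d : PySem.Dict String Int) (hk : d.keys = pvK5) (k : String)
    (hkm : k ∈ pvK5) :
    pvScoreOf (d.modify k 0 (· + 1)) = pvScoreOf d + pvScoreMap.getD k 0 := by
  have hnd : d.keys.Nodup := by rw [hk]; decide
  have hk' := pv_keys_modify_K5 d hk k hkm
  have hnd' : (d.modify k 0 (· + 1)).keys.Nodup := by rw [hk']; decide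
  unfold pvScoreOf
  rw [PySem.Dict.items_eq_map_keys _ hnd 0, PySem.Dict.items_eq_map_keys _ hnd' 0, hk, hk']
  simp only [pvK5] at hkm ⊢
  fin_cases hkm <;> simp [List.foldl, PySem.Dict.getD_modify] <;> ring

lemma pv_main (input : List String) : ∀ (d : PySem.Dict String Int), d.keys = pvK5 →
    pvScoreOf (input.foldl
      (fun d line => d.modify (get_first_invalid_closing_bracket line) 0 (· + 1)) d)
    = pvScoreOf d + input.foldl (fun total line =>
        total + pvFirstCloserScore (pvReduce
          (line.toList.filter (fun c => pvScoresB.contains c || pvPairsB.contains c)))) 0 := by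
  induction input with
  | nil => intro d _; simp [List.foldl]
  | cons line rest ih =>
    intro d hk
    have hm : get_first_invalid_closing_bracket line ∈ pvK5 := pv_gfi_mem line.toList []
    simp only [List.foldl_cons]
    rw [ih _ (pv_keys_modify_K5 d hk _ hm), pv_scoreOf_modify d hk _ hm]
    rw [PySem.List.foldl_add, PySem.List.foldl_add]
    rw [pv_line_eq line]
    ring

-- ===== VERDICT (by name: the statement is the Claim_ definition above) =====
theorem get_part_1_answer_spec : Claim_equal_get_part_1_answer := by
  intro input _
  unfold Spec_get_part_1_answer get_part_1_answer get_part_1_answer_alt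
  have h := pv_main input
    (PySem.Dict.ofList [("", 0), (")", 0), ("]", 0), ("}", 0), (">", 0)]) (by decide)
  have h0 : pvScoreOf (PySem.Dict.ofList [("", 0), (")", 0), ("]", 0), ("}", 0), (">", 0)]) = 0 := by
    decide
  rw [h0, zero_add] at h
  exact h
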